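-- pv_equiv track=rewrite | github.com/RidSoftware/University-Work | yr2/Semester2/Data Structures and Algortihms/quiz11/def floyd_warshall(graph, num_vertices):.py | find_max_distance_pairs
-- ===== SOURCE A (Python) =====
-- def find_max_distance_pairs(distances):
--     max_distance = 0
--     max_distance_pairs = []
--
--     num_vertices = len(distances)
--
--     # Iterate through all pairs of vertices
--     for i in range(num_vertices):
--         for j in range(i+1, num_vertices):
--             # If the distance is greater than the current maximum, update maximum
--             if distances[i][j] > max_distance:
--                 max_distance = distances[i][j]
--                 max_distance_pairs = [(i, j)]
--             # If the distance is equal to the current maximum, add the pair to the list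
--             elif distances[i][j] == max_distance:
--                 max_distance_pairs.append((i, j))
--
--     return max_distance, max_distance_pairs
-- ===== SOURCE B (Python) =====
-- def find_max_distance_pairs(distances):
--     n = len(distances)
--     pairs = [(i, j) for i in range(n) for j in range(i + 1, n)]
--     max_distance = max([0] + [distances[i][j] for i, j in pairs])
--     max_distance_pairs = [(i, j) for i, j in pairs if distances[i][j] == max_distance]
--     return max_distance, max_distance_pairs
-- ===== Notes on version B (the rewrite author's own statement) =====
-- stated objective: simpler
-- what changed: Replaces A's fused running-max loop with mutable reset/append pair list by a compute-then-filter decomposition: first take the maximum (floored at 0) over all upper-triangle entries, then build the pair list with one row-major filter.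
import Mathlib
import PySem

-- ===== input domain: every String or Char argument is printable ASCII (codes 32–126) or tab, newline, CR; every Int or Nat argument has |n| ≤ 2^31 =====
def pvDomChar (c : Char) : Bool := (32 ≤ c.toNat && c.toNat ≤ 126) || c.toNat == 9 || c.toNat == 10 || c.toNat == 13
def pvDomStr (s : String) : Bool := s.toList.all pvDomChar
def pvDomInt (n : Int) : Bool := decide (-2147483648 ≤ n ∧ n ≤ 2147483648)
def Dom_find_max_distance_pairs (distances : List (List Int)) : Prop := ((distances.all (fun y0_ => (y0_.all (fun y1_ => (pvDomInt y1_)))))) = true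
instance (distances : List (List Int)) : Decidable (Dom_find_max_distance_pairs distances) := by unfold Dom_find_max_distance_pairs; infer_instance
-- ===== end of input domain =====

-- B replaces A's fused running-max loop (reset/append pair list) by a compute-then-filter
-- decomposition over the same upper-triangle entries; objective: simpler.

-- ===== PORT A =====
-- distances[i][j] is read via pyGetD; Pre_ guarantees the indices are in range, where this
-- matches Python exactly.
def find_max_distance_pairs (distances : List (List Int)) : Int × (List (Int × Int)) :=
  let n : Int := (distances.length : Int)
  (PySem.List.pyRange 0 n 1).foldl (fun st i =>
    (PySem.List.pyRange (i + 1) n 1).foldl (fun st j =>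
      let d := PySem.List.pyGetD (PySem.List.pyGetD distances i []) j 0
      if d > st.1 then (d, [(i, j)])
      else if d = st.1 then (st.1, st.2 ++ [(i, j)])
      else st) st)
    ((0 : Int), ([] : List (Int × Int)))

-- ===== PORT B =====
def find_max_distance_pairs_alt (distances : List (List Int)) : Int × (List (Int × Int)) :=
  let n : Int := (distances.length : Int)
  let pairs : List (Int × Int) :=
    (PySem.List.pyRange 0 n 1).flatMap (fun i =>
      (PySem.List.pyRange (i + 1) n 1).map (fun j => (i, j)))
  let max_distance : Int :=
    ((0 : Int) :: pairs.map (fun p => PySem.List.pyGetD (PySem.List.pyGetD distances p.1 []) p.2 0)).foldl max 0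
  let max_distance_pairs : List (Int × Int) :=
    pairs.filter (fun p => PySem.List.pyGetD (PySem.List.pyGetD distances p.1 []) p.2 0 = max_distance)
  (max_distance, max_distance_pairs)

-- ===== PRECONDITION & SPEC =====
-- Pre_ excludes exactly the ragged inputs on which Python A raises IndexError:
-- every row i with i+1 < n must have at least n entries (row n-1 is never indexed).
def Pre_find_max_distance_pairs (distances : List (List Int)) : Prop :=
  ∀ i : Fin distances.length, (i : Nat) + 1 < distances.length →
    distances.length ≤ (distances.get i).length
instance (distances : List (List Int)) : Decidable (Pre_find_max_distance_pairs distances) := by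
  unfold Pre_find_max_distance_pairs; infer_instance
def pvWitness_find_max_distance_pairs : List (List Int) := [[0, 3, 1], [9, 0, 3], [4, 5, 0]]

def Spec_find_max_distance_pairs (distances : List (List Int)) (out : Int × (List (Int × Int))) : Prop := out = find_max_distance_pairs_alt distances
instance (distances : List (List Int)) (out : Int × (List (Int × Int))) : Decidable (Spec_find_max_distance_pairs distances out) := by unfold Spec_find_max_distance_pairs; infer_instance

-- ===== CLAIM (what is proved, stated in full; the proofs are below) =====
def Claim_equal_find_max_distance_pairs : Prop := ∀ (distances : List (List Int)), Dom_find_max_distance_pairs distances → Pre_find_max_distance_pairs distances → Spec_find_max_distance_pairs distances (find_max_distance_pairs distances)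

-- ===== LEMMAS AND PROOFS =====

-- A's loop body, abstracted over the entry value carried with the pair.
def pvStep (st : Int × List (Int × Int)) (e : (Int × Int) × Int) : Int × List (Int × Int) :=
  if e.2 > st.1 then (e.2, [e.1])
  else if e.2 = st.1 then (st.1, st.2 ++ [e.1])
  else st

-- Characterisation of A's fused loop: final max is the fold of max, final list is
-- (the carried list, kept only if the max never moved) ++ the pairs whose value equals the final max.
theorem pvLe_foldl_max (l : List ((Int × Int) × Int)) : ∀ m : Int,
    m ≤ l.foldl (fun a e => max a e.2) m := by
  induction l with
  | nil => intro m; simp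
  | cons r rs ihr =>
    intro m
    simp only [List.foldl_cons]
    exact le_trans (le_max_left m r.2) (ihr (max m r.2))

theorem pvLoop_eq (es : List ((Int × Int) × Int)) : ∀ (m : Int) (ps : List (Int × Int)),
    es.foldl pvStep (m, ps) =
      (es.foldl (fun a e => max a e.2) m,
       (if es.foldl (fun a e => max a e.2) m = m then ps else []) ++
         (es.filter (fun e => e.2 = es.foldl (fun a e => max a e.2) m)).map Prod.fst) := by
  induction es with
  | nil => intro m ps; simp
  | cons e rest ih =>
    intro m ps
    have hmax : ∀ m' : Int, m' ≤ rest.foldl (fun a e => max a e.2) m' :=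
      fun m' => pvLe_foldl_max rest m'
    simp only [List.foldl_cons, List.filter_cons]
    by_cases h1 : e.2 > m
    · have hm : max m e.2 = e.2 := by omega
      have hstep : pvStep (m, ps) e = (e.2, [e.1]) := by simp [pvStep, h1]
      rw [hstep, ih]
      have hMge := hmax e.2
      have hne : ¬ rest.foldl (fun a e => max a e.2) e.2 = m := by omega
      simp only [hm, if_neg hne]
      by_cases h2 : rest.foldl (fun a e => max a e.2) e.2 = e.2
      · simp [h2]
      · have : ¬ (e.2 = rest.foldl (fun a e => max a e.2) e.2) := fun h => h2 h.symm
        simp [this, h2]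
    · have hm : max m e.2 = m := by omega
      by_cases h2 : e.2 = m
      · have hstep : pvStep (m, ps) e = (m, ps ++ [e.1]) := by simp [pvStep, h2]
        rw [hstep, ih]
        simp only [hm]
        by_cases h3 : rest.foldl (fun a e => max a e.2) m = m
        · simp [h3, h2]
        · have : ¬ (e.2 = rest.foldl (fun a e => max a e.2) m) := by
            have := hmax m; omega
          simp [h3, this]
      · have hstep : pvStep (m, ps) e = (m, ps) := by simp [pvStep, h1, h2]
        rw [hstep, ih]
        simp only [hm]
        have : ¬ (e.2 = rest.foldl (fun a e => max a e.2) m) := by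
          have := hmax m; omega
        simp [this]

theorem pvFoldl_flatMap {α β σ : Type} (g : α → List β) (f : σ → β → σ) (l : List α) (init : σ) :
    (l.flatMap g).foldl f init = l.foldl (fun st a => (g a).foldl f st) init := by
  induction l generalizing init with
  | nil => rfl
  | cons a l ih => simp [List.flatMap_cons, List.foldl_append, ih]

theorem pvFilter_map_graph {α : Type} (g : α → Int) (M : Int) (l : List α) :
    ((l.map (fun p => (p, g p))).filter (fun e => e.2 = M)).map Prod.fst =
      l.filter (fun p => g p = M) := by
  induction l with
  | nil => rfl
  | cons a l ih =>
    simp only [List.map_cons, List.filter_cons]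
    by_cases h : g a = M
    · simp [h, ih]
    · simp [h, ih]

-- ===== VERDICT (by name: the statement is the Claim_ definition above) =====
theorem find_max_distance_pairs_spec : Claim_equal_find_max_distance_pairs := by
  intro distances _ _
  unfold Spec_find_max_distance_pairs find_max_distance_pairs find_max_distance_pairs_alt
  set n : Int := (distances.length : Int) with hn
  set pairs : List (Int × Int) :=
    (PySem.List.pyRange 0 n 1).flatMap (fun i =>
      (PySem.List.pyRange (i + 1) n 1).map (fun j => (i, j))) with hpairs
  set g : Int × Int → Int :=
    fun p => PySem.List.pyGetD (PySem.List.pyGetD distances p.1 []) p.2 0 with hg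
  -- rewrite A's nested loop as one fold of pvStep over the graph list
  have hfun : ∀ (st : Int × List (Int × Int)) (i : Int),
      (PySem.List.pyRange (i + 1) n 1).foldl (fun st j =>
        let d := PySem.List.pyGetD (PySem.List.pyGetD distances i []) j 0
        if d > st.1 then (d, [(i, j)])
        else if d = st.1 then (st.1, st.2 ++ [(i, j)])
        else st) st
      = (((PySem.List.pyRange (i + 1) n 1).map (fun j => (i, j))).map
          (fun p => (p, g p))).foldl pvStep st := by
    intro st i
    rw [List.map_map, List.foldl_map]
    rfl
  have hA : (PySem.List.pyRange 0 n 1).foldl (fun st i =>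
      (PySem.List.pyRange (i + 1) n 1).foldl (fun st j =>
        let d := PySem.List.pyGetD (PySem.List.pyGetD distances i []) j 0
        if d > st.1 then (d, [(i, j)])
        else if d = st.1 then (st.1, st.2 ++ [(i, j)])
        else st) st)
      ((0 : Int), ([] : List (Int × Int)))
      = (pairs.map (fun p => (p, g p))).foldl pvStep ((0 : Int), []) := by
    rw [hpairs, List.map_flatMap, pvFoldl_flatMap]
    apply PySem.List.foldl_congr_mem
    intro st i _
    exact hfun st i
  rw [hA, pvLoop_eq]
  have hM : (pairs.map (fun p => (p, g p))).foldl (fun a e => max a e.2) 0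
      = ((0 : Int) :: pairs.map g).foldl max 0 := by
    simp [List.foldl_map]
  rw [hM]
  refine Prod.ext rfl ?_
  simp only [ite_self, List.nil_append]
  rw [pvFilter_map_graph]
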